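-- pv_equiv track=rewrite | github.com/Sonu0111/Castinator | cp/916/D.py | get_max_of_activities
-- ===== SOURCE A (Python) =====
-- def get_max_of_activities(n,a,b,c):
--     result=0
--     for x in range(0,n):
--         check_sum=0
--         for y in range(0,n):
--             if(x!=y):
--                 for z in range(0,n):
--                     if(y!=z and x!=z):
--                         check_sum=a[x]+b[y]+c[z]
--                         result=max(result,check_sum)
--
--     return result
-- ===== SOURCE B (Python) =====
-- def get_max_of_activities(n, a, b, c):
--     # Top-3 candidate indices per array suffice: any optimal distinct triple can be
--     # exchanged into one using only these (at most 2 candidates are blocked per array).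
--     if n < 3:
--         return 0
--     ta = sorted(range(n), key=lambda i: a[i], reverse=True)[:3]
--     tb = sorted(range(n), key=lambda i: b[i], reverse=True)[:3]
--     tc = sorted(range(n), key=lambda i: c[i], reverse=True)[:3]
--     best = 0
--     for x in ta:
--         for y in tb:
--             for z in tc:
--                 if x != y and y != z and x != z:
--                     best = max(best, a[x] + b[y] + c[z])
--     return best
-- ===== Notes on version B (the rewrite author's own statement) =====
-- stated objective: faster
-- what changed: Instead of scanning all n^3 index triples, B selects the top-3 indices by value from each array (one sort per array) and maximises over the 27 candidate combinations with a distinctness check, which is exact by an exchange argument.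
import Mathlib
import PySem

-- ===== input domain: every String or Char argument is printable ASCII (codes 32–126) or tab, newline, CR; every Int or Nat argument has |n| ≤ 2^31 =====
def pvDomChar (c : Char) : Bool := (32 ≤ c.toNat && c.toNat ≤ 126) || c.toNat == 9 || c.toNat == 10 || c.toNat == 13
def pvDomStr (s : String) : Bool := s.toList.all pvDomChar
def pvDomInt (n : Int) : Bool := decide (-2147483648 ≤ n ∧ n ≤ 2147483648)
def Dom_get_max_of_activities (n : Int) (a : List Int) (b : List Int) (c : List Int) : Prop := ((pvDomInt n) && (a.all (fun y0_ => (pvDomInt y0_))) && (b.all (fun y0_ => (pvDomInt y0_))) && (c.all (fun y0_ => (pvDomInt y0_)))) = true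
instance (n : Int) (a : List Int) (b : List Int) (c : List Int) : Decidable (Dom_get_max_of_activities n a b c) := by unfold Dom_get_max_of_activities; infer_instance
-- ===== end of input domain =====

-- B replaces A's scan of all n^3 index triples by taking the top-3 indices by value of
-- each array (sorting once per array) and maximising over the 27 candidate combinations.

-- ===== PORT A =====
-- Literal port of A's triple loop; a[x]/b[y]/c[z] is pyGetD (in range under Pre_, where
-- Python does not raise); the state carries (result, check_sum) exactly as in A.
def get_max_of_activities (n : Int) (a : List Int) (b : List Int) (c : List Int) : Int :=
  (PySem.List.pyRange 0 n 1).foldl (fun result x =>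
    ((PySem.List.pyRange 0 n 1).foldl (fun (s : Int × Int) y =>
        if x ≠ y then
          (PySem.List.pyRange 0 n 1).foldl (fun (s : Int × Int) z =>
            if y ≠ z ∧ x ≠ z then
              let check_sum := PySem.List.pyGetD a x 0 + PySem.List.pyGetD b y 0 + PySem.List.pyGetD c z 0
              (max s.1 check_sum, check_sum)
            else s) s
        else s) (result, 0)).1) 0

-- ===== PORT B =====
-- Port of Source B: sorted(range(n), key=…, reverse=True)[:3] per array ([:3] = take 3,
-- exact for a nonnegative slice bound), then the 27-combination fold.
def get_max_of_activities_alt (n : Int) (a : List Int) (b : List Int) (c : List Int) : Int :=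
  if n < 3 then 0
  else
    let ta := (PySem.List.sorted (PySem.List.pyRange 0 n 1) (fun i => PySem.List.pyGetD a i 0) true).take 3
    let tb := (PySem.List.sorted (PySem.List.pyRange 0 n 1) (fun i => PySem.List.pyGetD b i 0) true).take 3
    let tc := (PySem.List.sorted (PySem.List.pyRange 0 n 1) (fun i => PySem.List.pyGetD c i 0) true).take 3
    ta.foldl (fun best x =>
      tb.foldl (fun best y =>
        tc.foldl (fun best z =>
          if x ≠ y ∧ y ≠ z ∧ x ≠ z then
            max best (PySem.List.pyGetD a x 0 + PySem.List.pyGetD b y 0 + PySem.List.pyGetD c z 0)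
          else best) best) best) 0

-- ===== PRECONDITION & SPEC =====
-- Pre_ excludes exactly the inputs where Python A raises IndexError: n ≥ 3 (a distinct
-- triple is reached, so a[x]/b[y]/c[z] are evaluated) with some list shorter than n.
def Pre_get_max_of_activities (n : Int) (a : List Int) (b : List Int) (c : List Int) : Prop :=
  3 ≤ n → (n ≤ (a.length : Int) ∧ n ≤ (b.length : Int) ∧ n ≤ (c.length : Int))
instance (n : Int) (a : List Int) (b : List Int) (c : List Int) : Decidable (Pre_get_max_of_activities n a b c) := by unfold Pre_get_max_of_activities; infer_instance

def pvWitness_get_max_of_activities : Int × List Int × List Int × List Int :=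
  (3, [1, 2, 3], [4, 5, 6], [7, 8, 9])

def Spec_get_max_of_activities (n : Int) (a : List Int) (b : List Int) (c : List Int) (out : Int) : Prop := out = get_max_of_activities_alt n a b c
instance (n : Int) (a : List Int) (b : List Int) (c : List Int) (out : Int) : Decidable (Spec_get_max_of_activities n a b c out) := by unfold Spec_get_max_of_activities; infer_instance

-- ===== CLAIM (what is proved, stated in full; the proofs are below) =====
def Claim_equal_get_max_of_activities : Prop := ∀ (n : Int) (a : List Int) (b : List Int) (c : List Int), Dom_get_max_of_activities n a b c → Pre_get_max_of_activities n a b c → Spec_get_max_of_activities n a b c (get_max_of_activities n a b c)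

-- ===== LEMMAS AND PROOFS =====

-- Generic nested max-fold both ports reduce to.
def nfold (fa fb fc : Int → Int) (La Lb Lc : List Int) (init : Int) : Int :=
  La.foldl (fun r x =>
    Lb.foldl (fun r y =>
      Lc.foldl (fun r z =>
        if x ≠ y ∧ y ≠ z ∧ x ≠ z then max r (fa x + fb y + fc z) else r) r) r) init

theorem foldl_ge_init {α : Type} (g : Int → α → Int) (h : ∀ r x, r ≤ g r x) :
    ∀ (L : List α) (i : Int), i ≤ L.foldl g i := by
  intro L
  induction L with
  | nil => intro i; simp
  | cons x L ih => intro i; exact le_trans (h i x) (ih (g i x))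

theorem foldl_le_bound {α : Type} (g : Int → α → Int) (M : Int) :
    ∀ (L : List α) (i : Int), (∀ r x, x ∈ L → r ≤ M → g r x ≤ M) → i ≤ M → L.foldl g i ≤ M := by
  intro L
  induction L with
  | nil => intro i _ hi; simpa using hi
  | cons x L ih =>
    intro i h hi
    exact ih (g i x) (fun r y hy => h r y (List.mem_cons_of_mem _ hy)) (h i x (List.mem_cons_self) hi)

theorem le_foldl_of_mem {α : Type} (g : Int → α → Int) (hmono : ∀ r x, r ≤ g r x)
    (t : Int) (x : α) (hx : ∀ r, t ≤ g r x) :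
    ∀ (L : List α) (i : Int), x ∈ L → t ≤ L.foldl g i := by
  intro L
  induction L with
  | nil => intro i h; cases h
  | cons y L ih =>
    intro i h
    rcases List.mem_cons.mp h with h | h
    · subst h; exact le_trans (hx i) (foldl_ge_init g hmono L (g i x))
    · exact ih (g i y) h

theorem foldl_fst {α : Type} (step : Int × Int → α → Int × Int) (f : Int → α → Int)
    (h : ∀ s x, (step s x).1 = f s.1 x) :
    ∀ (L : List α) (s : Int × Int), (L.foldl step s).1 = L.foldl f s.1 := by
  intro L
  induction L with
  | nil => intro s; rfl
  | cons x L ih => intro s; rw [List.foldl_cons, List.foldl_cons, ih, h]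

theorem foldl_ext_mem {α : Type} (f g : Int → α → Int) :
    ∀ (L : List α) (i : Int), (∀ r x, x ∈ L → f r x = g r x) → L.foldl f i = L.foldl g i := by
  intro L
  induction L with
  | nil => intro i _; rfl
  | cons x L ih =>
    intro i h
    rw [List.foldl_cons, List.foldl_cons, h i x List.mem_cons_self,
      ih _ (fun r y hy => h r y (List.mem_cons_of_mem _ hy))]

theorem foldl_id {α : Type} (g : Int → α → Int) (h : ∀ r x, g r x = r) :
    ∀ (L : List α) (i : Int), L.foldl g i = i := by
  intro L
  induction L with
  | nil => intro i; rfl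
  | cons x L ih => intro i; rw [List.foldl_cons, h, ih]

theorem nfold_step_mono (fa fb fc : Int → Int) (Lb Lc : List Int) :
    ∀ (r x : Int), r ≤ Lb.foldl (fun r y =>
      Lc.foldl (fun r z =>
        if x ≠ y ∧ y ≠ z ∧ x ≠ z then max r (fa x + fb y + fc z) else r) r) r := by
  intro r x
  apply foldl_ge_init
  intro r y
  apply foldl_ge_init
  intro r z
  split
  · exact le_max_left _ _
  · exact le_refl _

theorem nfold_ge_init (fa fb fc : Int → Int) (La Lb Lc : List Int) (init : Int) :
    init ≤ nfold fa fb fc La Lb Lc init :=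
  foldl_ge_init _ (nfold_step_mono fa fb fc Lb Lc) La init

theorem nfold_le_of_mem (fa fb fc : Int → Int) (La Lb Lc : List Int) (init : Int)
    (x y z : Int) (hx : x ∈ La) (hy : y ∈ Lb) (hz : z ∈ Lc)
    (hxy : x ≠ y) (hyz : y ≠ z) (hxz : x ≠ z) :
    fa x + fb y + fc z ≤ nfold fa fb fc La Lb Lc init := by
  apply le_foldl_of_mem _ (nfold_step_mono fa fb fc Lb Lc) _ x _ La init hx
  intro r
  apply le_foldl_of_mem _ (by intro r y; apply foldl_ge_init; intro r z; split
                              · exact le_max_left _ _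
                              · exact le_refl _) _ y _ Lb r hy
  intro r
  apply le_foldl_of_mem _ (by intro r z; split
                              · exact le_max_left _ _
                              · exact le_refl _) _ z _ Lc r hz
  intro r
  simp [hxy, hyz, hxz]

theorem nfold_le_bound (fa fb fc : Int → Int) (La Lb Lc : List Int) (init M : Int)
    (hinit : init ≤ M)
    (h : ∀ x ∈ La, ∀ y ∈ Lb, ∀ z ∈ Lc, x ≠ y → y ≠ z → x ≠ z → fa x + fb y + fc z ≤ M) :
    nfold fa fb fc La Lb Lc init ≤ M := by
  apply foldl_le_bound _ _ La init _ hinit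
  intro r x hxm hr
  apply foldl_le_bound _ _ Lb r _ hr
  intro r y hym hr
  apply foldl_le_bound _ _ Lc r _ hr
  intro r z hzm hr
  split
  · rename_i hcond
    exact max_le hr (h x hxm y hym z hzm hcond.1 hcond.2.1 hcond.2.2)
  · exact hr

-- A's port, with the (result, check_sum) pair projected away, is nfold over range(n)^3.
theorem portA_eq_nfold (n : Int) (a b c : List Int) :
    get_max_of_activities n a b c =
      nfold (fun i => PySem.List.pyGetD a i 0) (fun i => PySem.List.pyGetD b i 0)
            (fun i => PySem.List.pyGetD c i 0)
            (PySem.List.pyRange 0 n 1) (PySem.List.pyRange 0 n 1) (PySem.List.pyRange 0 n 1) 0 := by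
  unfold get_max_of_activities nfold
  apply foldl_ext_mem
  intro r x _
  rw [foldl_fst _ (fun r y =>
        if x ≠ y then
          (PySem.List.pyRange 0 n 1).foldl (fun r z =>
            if y ≠ z ∧ x ≠ z then
              max r (PySem.List.pyGetD a x 0 + PySem.List.pyGetD b y 0 + PySem.List.pyGetD c z 0)
            else r) r
        else r)]
  · apply foldl_ext_mem
    intro r y _
    by_cases hxy : x ≠ y
    · rw [if_pos hxy]
      apply foldl_ext_mem
      intro r z _
      by_cases h : y ≠ z ∧ x ≠ z
      · rw [if_pos h, if_pos ⟨hxy, h⟩]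
      · rw [if_neg h, if_neg (by tauto)]
    · rw [if_neg hxy]
      rw [foldl_id]
      intro r z
      rw [if_neg (by tauto)]
  · intro s y
    by_cases hxy : x ≠ y
    · simp only [if_pos hxy]
      rw [foldl_fst _ (fun r z =>
            if y ≠ z ∧ x ≠ z then
              max r (PySem.List.pyGetD a x 0 + PySem.List.pyGetD b y 0 + PySem.List.pyGetD c z 0)
            else r)]
      intro s z
      split <;> rfl
    · simp only [if_neg hxy]

-- any 3-element duplicate-free list has an element avoiding two given values
theorem pick3 (l : List Int) (hn : l.Nodup) (hl : l.length = 3) (u v : Int) :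
    ∃ w ∈ l, w ≠ u ∧ w ≠ v := by
  match l, hl with
  | [p, q, r], _ =>
    simp only [List.nodup_cons, List.mem_cons, List.not_mem_nil, or_false,
      List.nodup_nil, and_true, not_or] at hn
    by_cases hp : p ≠ u ∧ p ≠ v
    · exact ⟨p, by simp, hp⟩
    · by_cases hq : q ≠ u ∧ q ≠ v
      · exact ⟨q, by simp, hq⟩
      · refine ⟨r, by simp, ?_, ?_⟩ <;> push Not at hp hq <;> by_cases hpu : p = u <;> omega

-- exchange argument: any distinct triple of U is dominated by a distinct triple of ta×tb×tc
theorem exchange (fa fb fc : Int → Int) (U ta tb tc : List Int)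
    (hna : ta.Nodup) (hla : ta.length = 3) (hda : ∀ i ∈ U, i ∉ ta → ∀ j ∈ ta, fa i ≤ fa j)
    (hnb : tb.Nodup) (hlb : tb.length = 3) (hdb : ∀ i ∈ U, i ∉ tb → ∀ j ∈ tb, fb i ≤ fb j)
    (hnc : tc.Nodup) (hlc : tc.length = 3) (hdc : ∀ i ∈ U, i ∉ tc → ∀ j ∈ tc, fc i ≤ fc j)
    (x y z : Int) (hx : x ∈ U) (hy : y ∈ U) (hz : z ∈ U)
    (hxy : x ≠ y) (hyz : y ≠ z) (hxz : x ≠ z) :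
    ∃ x' ∈ ta, ∃ y' ∈ tb, ∃ z' ∈ tc, x' ≠ y' ∧ y' ≠ z' ∧ x' ≠ z' ∧
      fa x + fb y + fc z ≤ fa x' + fb y' + fc z' := by
  obtain ⟨x', hx'm, hx'y, hx'z, hfa⟩ :
      ∃ x' ∈ ta, x' ≠ y ∧ x' ≠ z ∧ fa x ≤ fa x' := by
    by_cases h : x ∈ ta
    · exact ⟨x, h, hxy, hxz, le_refl _⟩
    · obtain ⟨w, hw, hwy, hwz⟩ := pick3 ta hna hla y z
      exact ⟨w, hw, hwy, hwz, hda x hx h w hw⟩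
  obtain ⟨y', hy'm, hy'x, hy'z, hfb⟩ :
      ∃ y' ∈ tb, y' ≠ x' ∧ y' ≠ z ∧ fb y ≤ fb y' := by
    by_cases h : y ∈ tb
    · exact ⟨y, h, fun e => hx'y e.symm, hyz, le_refl _⟩
    · obtain ⟨w, hw, hwx, hwz⟩ := pick3 tb hnb hlb x' z
      exact ⟨w, hw, hwx, hwz, hdb y hy h w hw⟩
  obtain ⟨z', hz'm, hz'x, hz'y, hfc⟩ :
      ∃ z' ∈ tc, z' ≠ x' ∧ z' ≠ y' ∧ fc z ≤ fc z' := by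
    by_cases h : z ∈ tc
    · exact ⟨z, h, fun e => hx'z e.symm, fun e => hy'z e.symm, le_refl _⟩
    · obtain ⟨w, hw, hwx, hwy⟩ := pick3 tc hnc hlc x' y'
      exact ⟨w, hw, hwx, hwy, hdc z hz h w hw⟩
  exact ⟨x', hx'm, y', hy'm, z', hz'm, fun e => hy'x e.symm, fun e => hz'y e.symm,
    fun e => hz'x e.symm, by omega⟩

-- properties of take 3 of the reverse-sorted index list
theorem top3_props (n : Int) (hn : 3 ≤ n) (f : Int → Int) :
    let t := (PySem.List.sorted (PySem.List.pyRange 0 n 1) f true).take 3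
    t.Nodup ∧ t.length = 3 ∧
      (∀ j ∈ t, j ∈ PySem.List.pyRange 0 n 1) ∧
      (∀ i ∈ PySem.List.pyRange 0 n 1, i ∉ t → ∀ j ∈ t, f i ≤ f j) := by
  intro t
  set s := PySem.List.sorted (PySem.List.pyRange 0 n 1) f true with hs
  have hperm : s.Perm (PySem.List.pyRange 0 n 1) := PySem.List.sorted_perm _ _ _
  have hnodup : s.Nodup := hperm.nodup_iff.mpr (PySem.List.nodup_pyRange_one 0 n)
  have hlen : s.length = (n : Int).toNat := by
    rw [hperm.length_eq, PySem.List.length_pyRange_one]; omega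
  refine ⟨(List.take_sublist 3 s).nodup hnodup, ?_, ?_, ?_⟩
  · rw [List.length_take, hlen]; omega
  · intro j hj
    exact hperm.mem_iff.mp (List.mem_of_mem_take hj)
  · intro i hi hit j hjt
    have hpw : s.Pairwise (fun a b => f b ≤ f a) := PySem.List.sorted_pairwise_rev _ _
    have hsplit : s = s.take 3 ++ s.drop 3 := (List.take_append_drop 3 s).symm
    rw [hsplit] at hpw
    have hid : i ∈ s.drop 3 := by
      have : i ∈ s := hperm.mem_iff.mpr hi
      rw [hsplit] at this
      rcases List.mem_append.mp this with h | h
      · exact absurd h hit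
      · exact h
    exact (List.pairwise_append.mp hpw).2.2 j hjt i hid

theorem no_triple_of_lt_three (n : Int) (hn : n < 3) (x y z : Int)
    (hx : x ∈ PySem.List.pyRange 0 n 1) (hy : y ∈ PySem.List.pyRange 0 n 1)
    (hz : z ∈ PySem.List.pyRange 0 n 1) (hxy : x ≠ y) (hyz : y ≠ z) (hxz : x ≠ z) : False := by
  rw [PySem.List.mem_pyRange_one] at hx hy hz
  omega

-- ===== VERDICT (by name: the statement is the Claim_ definition above) =====
theorem get_max_of_activities_spec : Claim_equal_get_max_of_activities := by
  intro n a b c _ _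
  unfold Spec_get_max_of_activities
  rw [portA_eq_nfold]
  set fa := fun i => PySem.List.pyGetD a i 0
  set fb := fun i => PySem.List.pyGetD b i 0
  set fc := fun i => PySem.List.pyGetD c i 0
  set U := PySem.List.pyRange 0 n 1 with hU
  by_cases hn : n < 3
  · -- no distinct triple exists: A's fold never updates and B returns 0
    unfold get_max_of_activities_alt
    rw [if_pos hn]
    refine le_antisymm ?_ (nfold_ge_init _ _ _ _ _ _ _)
    apply nfold_le_bound _ _ _ _ _ _ _ _ (le_refl 0)
    intro x hx y hy z hz hxy hyz hxz
    exact absurd (no_triple_of_lt_three n hn x y z hx hy hz hxy hyz hxz) not_false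
  · push Not at hn
    obtain ⟨hnda, hlta, hmta, hdta⟩ := top3_props n hn fa
    obtain ⟨hndb, hltb, hmtb, hdtb⟩ := top3_props n hn fb
    obtain ⟨hndc, hltc, hmtc, hdtc⟩ := top3_props n hn fc
    have hB : get_max_of_activities_alt n a b c =
        nfold fa fb fc ((PySem.List.sorted U fa true).take 3)
          ((PySem.List.sorted U fb true).take 3) ((PySem.List.sorted U fc true).take 3) 0 := by
      unfold get_max_of_activities_alt nfold
      rw [if_neg (by omega)]
    rw [hB]
    apply le_antisymm
    · -- A ≤ B by the exchange argument
      apply nfold_le_bound _ _ _ _ _ _ _ _ (nfold_ge_init _ _ _ _ _ _ _)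
      intro x hx y hy z hz hxy hyz hxz
      obtain ⟨x', hx'm, y', hy'm, z', hz'm, h1, h2, h3, hle⟩ :=
        exchange fa fb fc U _ _ _ hnda hlta hdta hndb hltb hdtb hndc hltc hdtc
          x y z hx hy hz hxy hyz hxz
      exact le_trans hle (nfold_le_of_mem _ _ _ _ _ _ _ x' y' z' hx'm hy'm hz'm h1 h2 h3)
    · -- B ≤ A since every candidate triple is a triple of U
      apply nfold_le_bound _ _ _ _ _ _ _ _ (nfold_ge_init _ _ _ _ _ _ _)
      intro x hx y hy z hz hxy hyz hxz
      exact nfold_le_of_mem _ _ _ _ _ _ _ x y z (hmta x hx) (hmtb y hy) (hmtc z hz) hxy hyz hxz
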